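-- pv_equiv track=rewrite | github.com/asperaa/back_to_grind | Binary_Search/1150. Check If a Number Is Majority Element in a Sorted Array.py | get_right_boundry
-- ===== SOURCE A (Python) =====
-- def get_right_boundry(nums, target):
--     left, right = 0, len(nums) - 1
--     right_boundry = -1
--     while left <= right:
--         mid = left + (right - left) // 2
--         if nums[mid] == target:
--             right_boundry = mid
--             left = mid + 1
--         elif nums[mid] > target:
--             right = mid - 1
--         else:
--             left = mid + 1
--     return right_boundry
-- ===== SOURCE B (Python) =====
-- def get_right_boundry(nums, target):
--     # Single forward linear scan: remember the last index whose value equals target.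
--     ans = -1
--     for i, v in enumerate(nums):
--         if v == target:
--             ans = i
--     return ans
-- ===== Notes on version B (the rewrite author's own statement) =====
-- stated objective: simpler
-- what changed: Replaces the binary search by a single forward linear scan with an accumulator remembering the last index equal to target; Pre_ excludes unsorted lists that contain the target, on which A's returned index is an accident of its binary-search probe sequence (the function presumes sorted input).
-- outside the precondition, e.g. on get_right_boundry([1, 0], 0): A returns -1, B returns 1
import Mathlib
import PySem

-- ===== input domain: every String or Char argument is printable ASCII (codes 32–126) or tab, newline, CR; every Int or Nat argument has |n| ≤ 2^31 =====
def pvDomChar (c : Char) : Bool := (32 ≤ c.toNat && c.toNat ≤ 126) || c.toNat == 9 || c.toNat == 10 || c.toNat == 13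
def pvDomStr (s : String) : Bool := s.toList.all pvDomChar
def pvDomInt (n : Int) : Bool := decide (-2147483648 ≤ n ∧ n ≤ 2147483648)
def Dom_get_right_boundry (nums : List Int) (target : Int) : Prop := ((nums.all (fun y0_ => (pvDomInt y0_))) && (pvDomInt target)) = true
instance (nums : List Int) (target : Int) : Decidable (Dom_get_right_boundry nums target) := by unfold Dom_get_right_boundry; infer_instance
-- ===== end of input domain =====

-- B replaces A's answer-accumulating binary search by a single forward linear scan that
-- remembers the last index whose value equals the target; simpler, O(n) instead of O(log n).


-- ===== PORT A =====
-- while left <= right: mid = left + (right-left)//2; == → record rb, go right; > → go left; < → go right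
-- (fuel is only a totality guard: one unit per loop iteration, never exhausted from the entry point)
def aLoop (nums : List Int) (target : Int) : Nat → Int → Int → Int → Int
  | 0, _, _, rb => rb
  | fuel + 1, left, right, rb =>
    if left ≤ right then
      let mid := left + PySem.Int.floordiv (right - left) 2
      match PySem.List.pyGet? nums mid with
      | some v =>
        if v = target then aLoop nums target fuel (mid + 1) right mid
        else if v > target then aLoop nums target fuel left (mid - 1) rb
        else aLoop nums target fuel (mid + 1) right rb
      | none => rb   -- unreachable: mid always lies in [left, right] ⊆ [0, len)
    else rb

def get_right_boundry (nums : List Int) (target : Int) : Int :=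
  aLoop nums target (nums.length + 1) 0 ((nums.length : Int) - 1) (-1)

-- ===== PORT B =====
-- ans = -1; for i, v in enumerate(nums): if v == target: ans = i; return ans
def get_right_boundry_alt (nums : List Int) (target : Int) : Int :=
  (PySem.List.enumerate nums).foldl (fun ans iv => if iv.2 = target then iv.1 else ans) (-1)

-- ===== PRECONDITION & SPEC =====
-- Pre_ excludes unsorted lists that contain the target: binary search presumes a sorted array,
-- and on such input A's returned index is an accident of its probe sequence that no natural
-- implementation matches (when the target is absent both programs return -1 on any list).
def Pre_get_right_boundry (nums : List Int) (target : Int) : Prop :=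
  List.Pairwise (· ≤ ·) nums ∨ target ∉ nums
instance (nums : List Int) (target : Int) : Decidable (Pre_get_right_boundry nums target) := by
  unfold Pre_get_right_boundry; infer_instance

def pvWitness_get_right_boundry : List Int × Int := ([1, 2, 2, 3], 2)

def Spec_get_right_boundry (nums : List Int) (target : Int) (out : Int) : Prop := out = get_right_boundry_alt nums target
instance (nums : List Int) (target : Int) (out : Int) : Decidable (Spec_get_right_boundry nums target out) := by unfold Spec_get_right_boundry; infer_instance

-- ===== CLAIM (what is proved, stated in full; the proofs are below) =====
def Claim_equal_get_right_boundry : Prop := ∀ (nums : List Int) (target : Int), Dom_get_right_boundry nums target → Pre_get_right_boundry nums target → Spec_get_right_boundry nums target (get_right_boundry nums target)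

-- ===== LEMMAS AND PROOFS =====

lemma mid_bounds {lo hi : Int} (h : lo < hi) :
    lo ≤ PySem.Int.floordiv (lo + hi) 2 ∧ PySem.Int.floordiv (lo + hi) 2 < hi := by
  rw [PySem.Int.floordiv_eq_ediv_of_pos (by omega : (0:Int) < 2)]
  omega

lemma mid_eq (left right : Int) (h : left ≤ right) :
    left + PySem.Int.floordiv (right - left) 2 = PySem.Int.floordiv (left + right) 2 := by
  rw [PySem.Int.floordiv_eq_ediv_of_pos (by omega : (0:Int) < 2),
      PySem.Int.floordiv_eq_ediv_of_pos (by omega : (0:Int) < 2)]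
  omega

lemma sorted_getElem_le {nums : List Int} (hs : List.Pairwise (· ≤ ·) nums)
    {i j : Nat} (hi : i < nums.length) (hj : j < nums.length) (hij : i ≤ j) :
    nums[i] ≤ nums[j] := by
  rcases Nat.lt_or_ge i j with h | h
  · exact (List.pairwise_iff_getElem.mp hs) i j hi hj h
  · have : i = j := by omega
    subst this; exact le_refl _

-- c is "the" boundary: everything strictly below c is ≤ target, everything from c on is > target.
def Bnd (nums : List Int) (target c : Int) : Prop :=
  0 ≤ c ∧ c ≤ nums.length ∧
  (∀ i : Nat, (h : i < nums.length) → (i : Int) < c → nums[i] ≤ target) ∧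
  (∀ i : Nat, (h : i < nums.length) → c ≤ (i : Int) → target < nums[i])

-- the value A produces from the boundary c
def postOf (nums : List Int) (target c : Int) : Int :=
  if 0 < c ∧ PySem.List.pyGet? nums (c - 1) = some target then c - 1 else -1

-- proof-only gadget: an upper-bound binary search whose fixpoint yields a boundary c
def bLoop (nums : List Int) (target : Int) : Nat → Int → Int → Int
  | 0, lo, _ => lo
  | fuel + 1, lo, hi =>
    if lo < hi then
      let mid := PySem.Int.floordiv (lo + hi) 2
      match PySem.List.pyGet? nums mid with
      | some v =>
        if v ≤ target then bLoop nums target fuel (mid + 1) hi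
        else bLoop nums target fuel lo mid
      | none => lo
    else lo

lemma bLoop_bnd (nums : List Int) (target : Int) (hs : List.Pairwise (· ≤ ·) nums) :
    ∀ (fuel : Nat) (lo hi : Int), (hi - lo).toNat < fuel →
    0 ≤ lo → lo ≤ hi → hi ≤ nums.length →
    (∀ i : Nat, (h : i < nums.length) → (i : Int) < lo → nums[i] ≤ target) →
    (∀ i : Nat, (h : i < nums.length) → hi ≤ (i : Int) → target < nums[i]) →
    Bnd nums target (bLoop nums target fuel lo hi) := by
  intro fuel
  induction fuel with
  | zero =>
    intro lo hi hn
    exact absurd hn (by omega)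
  | succ n ih =>
    intro lo hi hn h0 hlh hhn hlow hhigh
    by_cases hlt : lo < hi
    · rw [bLoop, if_pos hlt]
      have hmid := mid_bounds (lo := lo) (hi := hi) hlt
      set mid := PySem.Int.floordiv (lo + hi) 2 with hm
      have hget : PySem.List.pyGet? nums mid = some nums[mid.toNat] :=
        PySem.List.pyGet?_eq_some_getElem nums (by omega) (by omega)
      simp only [hget]
      split_ifs with hv
      · apply ih (mid + 1) hi (by omega) (by omega) (by omega) hhn
        · intro i h hi2
          have hle : nums[i] ≤ nums[mid.toNat] :=
            sorted_getElem_le hs h (by omega) (by omega)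
          exact le_trans hle hv
        · exact hhigh
      · apply ih lo mid (by omega) h0 (by omega) (by omega) hlow
        intro i h hi2
        have hle : nums[mid.toNat] ≤ nums[i] :=
          sorted_getElem_le hs (by omega) h (by omega)
        omega
    · rw [bLoop, if_neg hlt]
      exact ⟨h0, by omega, hlow, fun i h hi => hhigh i h (by omega)⟩

-- the right_boundry accumulator invariant of A's loop
def RbP (nums : List Int) (target left rb : Int) : Prop :=
  (rb = -1 ∧ ∀ i : Nat, (h : i < nums.length) → (i : Int) < left → nums[i] ≠ target) ∨
  (0 ≤ rb ∧ rb < left ∧ PySem.List.pyGet? nums rb = some target ∧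
    ∀ i : Nat, (h : i < nums.length) → rb < (i : Int) → (i : Int) < left → nums[i] ≠ target)

-- when the loop condition fails, rb already equals postOf c
lemma aLoop_done (nums : List Int) (target c : Int) (hs : List.Pairwise (· ≤ ·) nums)
    (hc : Bnd nums target c) (left right rb : Int)
    (hnl : ¬ left ≤ right)
    (h0 : 0 ≤ left) (hlr : left ≤ right + 1) (hrn : right < nums.length)
    (hlow : ∀ i : Nat, (h : i < nums.length) → (i : Int) < left → nums[i] ≤ target)
    (hhigh : ∀ i : Nat, (h : i < nums.length) → right < (i : Int) → target < nums[i])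
    (hrb : RbP nums target left rb) :
    rb = postOf nums target c := by
  obtain ⟨hc0, hcn, hcl, hch⟩ := hc
  have hceq : c = left := by
    rcases lt_trichotomy c left with h | h | h
    · have hin : c.toNat < nums.length := by omega
      have h1 := hlow c.toNat hin (by omega)
      have h2 := hch c.toNat hin (by omega)
      omega
    · exact h
    · have hin : left.toNat < nums.length := by omega
      have h1 := hcl left.toNat hin (by omega)
      have h2 := hhigh left.toNat hin (by omega)
      omega
  rcases hrb with ⟨hrb1, hne⟩ | ⟨hr0, hrl, hrt, hne⟩
  · have hpost : postOf nums target c = -1 := by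
      rw [postOf, if_neg]
      rintro ⟨hlp, hgp⟩
      have hin : (c - 1).toNat < nums.length := by omega
      rw [PySem.List.pyGet?_eq_some_getElem nums (by omega) (by omega)] at hgp
      have hval : nums[(c - 1).toNat] = target := by injection hgp
      exact hne (c - 1).toNat hin (by omega) hval
    rw [hpost, hrb1]
  · rw [PySem.List.pyGet?_eq_some_getElem nums (by omega) (by omega)] at hrt
    have hrtv : nums[rb.toNat] = target := by injection hrt
    have hrbeq : rb = c - 1 := by
      by_contra hne2
      have hin : (c - 1).toNat < nums.length := by omega
      have h1 := hne (c - 1).toNat hin (by omega) (by omega)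
      have h2 := hlow (c - 1).toNat hin (by omega)
      have h3 : nums[rb.toNat] ≤ nums[(c - 1).toNat] :=
        sorted_getElem_le hs (by omega) hin (by omega)
      omega
    rw [postOf, if_pos ⟨(by omega : (0:Int) < c), by
      rw [show c - 1 = rb by omega]
      rw [PySem.List.pyGet?_eq_some_getElem nums (by omega) (by omega)]
      rw [hrtv]⟩]
    omega

-- A's loop, given any boundary c, returns postOf c.
lemma aLoop_eq (nums : List Int) (target c : Int) (hs : List.Pairwise (· ≤ ·) nums)
    (hc : Bnd nums target c) :
    ∀ (fuel : Nat) (left right rb : Int), (right + 1 - left).toNat < fuel →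
    0 ≤ left → left ≤ right + 1 → right < nums.length →
    (∀ i : Nat, (h : i < nums.length) → (i : Int) < left → nums[i] ≤ target) →
    (∀ i : Nat, (h : i < nums.length) → right < (i : Int) → target < nums[i]) →
    RbP nums target left rb →
    aLoop nums target fuel left right rb = postOf nums target c := by
  obtain ⟨hc0, hcn, hcl, hch⟩ := hc
  intro fuel
  induction fuel with
  | zero =>
    intro left right rb hn
    exact absurd hn (by omega)
  | succ n ih =>
    intro left right rb hn h0 hlr hrn hlow hhigh hrb
    by_cases hle : left ≤ right
    · rw [aLoop, if_pos hle]
      simp only [mid_eq left right hle]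
      set mid := PySem.Int.floordiv (left + right) 2 with hm
      have hmid2 : left ≤ mid ∧ mid ≤ right := by
        have h1 := mid_eq left right hle
        have h2 : left ≤ left + PySem.Int.floordiv (right - left) 2 ∧
            left + PySem.Int.floordiv (right - left) 2 ≤ right := by
          rw [PySem.Int.floordiv_eq_ediv_of_pos (by omega : (0:Int) < 2)]
          omega
        omega
      have hget : PySem.List.pyGet? nums mid = some nums[mid.toNat] :=
        PySem.List.pyGet?_eq_some_getElem nums (by omega) (by omega)
      simp only [hget]
      split_ifs with hv1 hv2
      · apply ih (mid + 1) right mid (by omega) (by omega) (by omega) hrn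
        · intro i h hi2
          have hle2 : nums[i] ≤ nums[mid.toNat] :=
            sorted_getElem_le hs h (by omega) (by omega)
          omega
        · exact hhigh
        · right
          refine ⟨by omega, by omega, by rw [hget, hv1], ?_⟩
          intro i h h1 h2; omega
      · apply ih left (mid - 1) rb (by omega) h0 (by omega) (by omega) hlow ?_ hrb
        intro i h hi2
        have hle2 : nums[mid.toNat] ≤ nums[i] :=
          sorted_getElem_le hs (by omega) h (by omega)
        omega
      · have hvlt : nums[mid.toNat] < target := by omega
        have hstep : ∀ i : Nat, (h : i < nums.length) → (i : Int) < mid + 1 → nums[i] ≤ target := by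
          intro i h hi2
          have hle2 : nums[i] ≤ nums[mid.toNat] :=
            sorted_getElem_le hs h (by omega) (by omega)
          omega
        apply ih (mid + 1) right rb (by omega) (by omega) (by omega) hrn hstep hhigh
        rcases hrb with ⟨hrb1, hne⟩ | ⟨hr0, hrl, hrt, hne⟩
        · left
          refine ⟨hrb1, ?_⟩
          intro i h hi2
          by_cases hil : (i : Int) < left
          · exact hne i h hil
          · intro he
            have hle2 : nums[i] ≤ nums[mid.toNat] :=
              sorted_getElem_le hs h (by omega) (by omega)
            omega
        · right
          refine ⟨hr0, by omega, hrt, ?_⟩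
          intro i h h1 h2
          by_cases hil : (i : Int) < left
          · exact hne i h h1 hil
          · intro he
            have hle2 : nums[i] ≤ nums[mid.toNat] :=
              sorted_getElem_le hs h (by omega) (by omega)
            omega
    · rw [aLoop, if_neg hle]
      exact aLoop_done nums target c hs ⟨hc0, hcn, hcl, hch⟩ left right rb hle h0 hlr hrn hlow hhigh hrb

-- if the target does not occur, A's accumulator is never written: the loop returns rb unchanged
lemma aLoop_notin (nums : List Int) (target : Int) (hnotin : target ∉ nums) :
    ∀ (fuel : Nat) (left right rb : Int), aLoop nums target fuel left right rb = rb := by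
  intro fuel
  induction fuel with
  | zero => intro left right rb; rfl
  | succ n ih =>
    intro left right rb
    rw [aLoop]
    split_ifs with hle
    · cases hget : PySem.List.pyGet? nums (left + PySem.Int.floordiv (right - left) 2) with
      | none => simp only [hget]
      | some v =>
        have hv : v ∈ nums := PySem.List.mem_of_pyGet?_eq_some nums hget
        simp only [hget]
        split_ifs with h1 h2
        · exact absurd (h1 ▸ hv) hnotin
        · exact ih left _ rb
        · exact ih _ right rb
    · rfl

-- B's fold is the last matching index: characterize it via filter/map/getLastD
lemma fold_char (target : Int) :
    ∀ (l : List (Int × Int)) (a : Int),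
    l.foldl (fun ans iv => if iv.2 = target then iv.1 else ans) a
      = ((l.filter (fun iv => iv.2 = target)).map (fun iv => iv.1)).getLastD a := by
  intro l
  induction l with
  | nil => intro a; rfl
  | cons p rest ih =>
    intro a
    by_cases hp : p.2 = target
    · simp only [List.foldl_cons, List.filter_cons, hp, if_pos, decide_true, List.map_cons,
        List.getLastD_cons]
      exact ih p.1
    · simp only [List.foldl_cons, List.filter_cons, hp, decide_false]
      simp only [ite_false, Bool.false_eq_true]
      exact ih a

-- last element of a strictly increasing list that contains its upper bound
lemma getLastD_max :
    ∀ (L : List Int) (x d : Int), L.Pairwise (· < ·) → x ∈ L → (∀ y ∈ L, y ≤ x) →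
    L.getLastD d = x := by
  intro L
  induction L with
  | nil => intro x d _ hx _; simp at hx
  | cons z rest ih =>
    intro x d hp hx hub
    cases rest with
    | nil =>
      rcases List.mem_cons.mp hx with h | h
      · rw [h]; rfl
      · simp at h
    | cons w rest' =>
      rw [List.getLastD_cons]
      have hzw : z < w := (List.pairwise_cons.mp hp).1 w (by simp)
      have hx' : x ∈ w :: rest' := by
        rcases List.mem_cons.mp hx with h | h
        · exfalso
          have := hub w (by simp)
          omega
        · exact h
      exact ih x z (List.pairwise_cons.mp hp).2 hx' (fun y hy => hub y (List.mem_cons_of_mem _ hy))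

-- if the target does not occur, B returns -1
lemma alt_notin (nums : List Int) (target : Int) (hnotin : target ∉ nums) :
    get_right_boundry_alt nums target = -1 := by
  unfold get_right_boundry_alt
  rw [fold_char]
  have hfil : (PySem.List.enumerate nums).filter (fun iv => iv.2 = target) = [] := by
    rw [List.filter_eq_nil_iff]
    intro p hp
    obtain ⟨k, hk, hpk⟩ := (PySem.List.mem_enumerate_iff _ _ _).mp hp
    simp only [hpk, decide_eq_true_eq]
    intro he
    exact hnotin (he ▸ List.getElem_mem hk)
  rw [hfil]; rfl

-- on a sorted list with boundary c, B returns postOf c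
lemma alt_eq (nums : List Int) (target c : Int) (hs : List.Pairwise (· ≤ ·) nums)
    (hc : Bnd nums target c) :
    get_right_boundry_alt nums target = postOf nums target c := by
  obtain ⟨hc0, hcn, hcl, hch⟩ := hc
  by_cases hin : target ∈ nums
  · obtain ⟨j, hj, hjv⟩ := List.mem_iff_getElem.mp hin
    have hjc : (j : Int) < c := by
      by_contra h
      have := hch j hj (by omega)
      omega
    have hcpos : (0:Int) < c := by omega
    have hcv : nums[(c - 1).toNat] = target := by
      have h1 := hcl (c - 1).toNat (by omega) (by omega)
      have h2 : nums[j] ≤ nums[(c - 1).toNat] :=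
        sorted_getElem_le hs hj (by omega) (by omega)
      omega
    have hpost : postOf nums target c = c - 1 := by
      rw [postOf, if_pos ⟨hcpos, by
        rw [PySem.List.pyGet?_eq_some_getElem nums (by omega) (by omega), hcv]⟩]
    rw [hpost]
    unfold get_right_boundry_alt
    rw [fold_char]
    apply getLastD_max
    · -- strictly increasing indices survive filter and map
      exact List.Pairwise.map (fun iv : Int × Int => iv.1)
        (fun a b h => h)
        (List.Pairwise.filter _ (PySem.List.pairwise_lt_enumerate nums 0))
    · -- c - 1 is in the list
      refine List.mem_map.mpr ⟨((c - 1 : Int), target), ?_, rfl⟩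
      rw [List.mem_filter]
      refine ⟨(PySem.List.mem_enumerate_iff _ _ _).mpr ⟨(c - 1).toNat, by omega, ?_⟩, by simp⟩
      have h1 : (c - 1 : Int) = 0 + ((c - 1).toNat : Int) := by omega
      rw [hcv, ← h1]
    · -- every matching index is ≤ c - 1
      intro y hy
      obtain ⟨p, hpmem, hpy⟩ := List.mem_map.mp hy
      rw [List.mem_filter] at hpmem
      obtain ⟨k, hk, hpk⟩ := (PySem.List.mem_enumerate_iff _ _ _).mp hpmem.1
      have hkv : nums[k] = target := by
        have := hpmem.2
        rw [hpk] at this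
        simpa using this
      have hkc : (k : Int) < c := by
        by_contra h
        have := hch k hk (by omega)
        omega
      rw [hpk] at hpy
      simp only at hpy
      omega
  · rw [alt_notin nums target hin]
    rw [postOf, if_neg]
    rintro ⟨h1, h2⟩
    exact hin (PySem.List.mem_of_pyGet?_eq_some nums h2)

-- ===== VERDICT (by name: the statement is the Claim_ definition above) =====
theorem get_right_boundry_spec : Claim_equal_get_right_boundry := by
  intro nums target _hdom hpre
  unfold Spec_get_right_boundry
  rcases hpre with hs | hnotin
  case inr =>
    rw [alt_notin nums target hnotin]
    exact aLoop_notin nums target hnotin _ _ _ _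
  have hbnd : Bnd nums target (bLoop nums target (nums.length + 1) 0 nums.length) := by
    apply bLoop_bnd nums target hs (nums.length + 1) 0 nums.length (by omega)
      (by omega) (by omega) (by omega)
    · intro i h hi; omega
    · intro i h hi; exfalso; omega
  rw [alt_eq nums target _ hs hbnd]
  unfold get_right_boundry
  apply aLoop_eq nums target _ hs hbnd (nums.length + 1)
    0 ((nums.length : Int) - 1) (-1) (by omega) (by omega) (by omega) (by omega)
  · intro i h hi; omega
  · intro i h hi; exfalso; omega
  · left; exact ⟨rfl, fun i h hi => by omega⟩
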